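-- pv_equiv track=rewrite | github.com/sadra-f/LRKeywordExtraction | FeatureExtraction/Preprocess.py | is_bad_word
-- ===== SOURCE A (Python) =====
-- import string
--
-- def is_bad_word(value:str):
--     if len(value) < 3:
--         return True
--     for v in string.punctuation:
--         if v in value:
--             return True
--
--     for v in string.digits:
--         if v in value:
--             return True
--     return False
-- ===== SOURCE B (Python) =====
-- def is_bad_word(value: str):
--     if len(value) < 3:
--         return True
--     for c in value:
--         o = ord(c)
--         # bad iff printable non-space ASCII that is not a letter
--         # (= exactly string.punctuation + string.digits)
--         if 33 <= o <= 126 and not (65 <= o <= 90 or 97 <= o <= 122):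
--             return True
--     return False
-- ===== Notes on version B (the rewrite author's own statement) =====
-- stated objective: alternative
-- what changed: Replaced A's 45 substring scans of value (one per forbidden character) by a single early-exit pass over value's characters classifying each by an arithmetic ASCII-code range test (printable non-space and not a letter = punctuation or digit), with no forbidden-character table at all.
import Mathlib
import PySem

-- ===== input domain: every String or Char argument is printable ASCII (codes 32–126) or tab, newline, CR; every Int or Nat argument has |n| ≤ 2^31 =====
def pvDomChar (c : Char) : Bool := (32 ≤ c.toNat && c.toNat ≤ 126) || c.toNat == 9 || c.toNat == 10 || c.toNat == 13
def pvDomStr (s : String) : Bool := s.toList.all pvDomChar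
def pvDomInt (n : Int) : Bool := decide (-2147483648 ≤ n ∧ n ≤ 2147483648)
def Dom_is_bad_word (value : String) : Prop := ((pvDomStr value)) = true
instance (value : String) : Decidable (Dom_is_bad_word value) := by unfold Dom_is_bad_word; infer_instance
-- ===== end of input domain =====

-- B replaces A's per-forbidden-character substring scans by one early-exit pass over value's
-- characters, classifying each by an arithmetic ASCII-code range test (alternative decomposition).

-- ===== PORT A =====
-- string.punctuation and string.digits as lists of characters
def pvPunctuation : List Char := ['!', '"', '#', '$', '%', '&', '\'', '(', ')', '*', '+', ',', '-', '.', '/', ':', ';', '<', '=', '>', '?', '@', '[', '\\', ']', '^', '_', '\x60', '{', '|', '}', '~']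
def pvDigits : List Char := ['0', '1', '2', '3', '4', '5', '6', '7', '8', '9']

-- A: early-return loop over the forbidden alphabets; 'v in value' is Python substring membership
def is_bad_word (value : String) : Bool :=
  if PySem.Str.len value < 3 then true
  else if pvPunctuation.any (fun v => PySem.Chars.isIn [v] value.toList) then true
  else if pvDigits.any (fun v => PySem.Chars.isIn [v] value.toList) then true
  else false

-- ===== PORT B =====
-- the arithmetic classification of one character (ord-range test from Source B)
def pvBadCode (o : Nat) : Bool :=
  33 ≤ o && o ≤ 126 && !(65 ≤ o && o ≤ 90 || 97 ≤ o && o ≤ 122)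

-- the early-exit for-loop of Source B as structural recursion over the characters
def pvScanBad : List Char → Bool
  | [] => false
  | c :: rest => if pvBadCode c.toNat then true else pvScanBad rest

def is_bad_word_alt (value : String) : Bool :=
  if PySem.Str.len value < 3 then true
  else pvScanBad value.toList

-- ===== PRECONDITION & SPEC =====
def Spec_is_bad_word (value : String) (out : Bool) : Prop := out = is_bad_word_alt value
instance (value : String) (out : Bool) : Decidable (Spec_is_bad_word value out) := by unfold Spec_is_bad_word; infer_instance

-- ===== CLAIM (what is proved, stated in full; the proofs are below) =====
def Claim_equal_is_bad_word : Prop := ∀ (value : String), Dom_is_bad_word value → Spec_is_bad_word value (is_bad_word value)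

-- ===== LEMMAS AND PROOFS =====

-- single-character substring membership is character membership
theorem pv_isIn_singleton (c : Char) (l : List Char) :
    PySem.Chars.isIn [c] l = l.contains c := by
  rcases h : PySem.Chars.isIn [c] l with _ | _
  · rw [PySem.Chars.isIn_eq_false_iff] at h
    symm
    simp only [List.contains_eq_mem, decide_eq_false_iff_not]
    intro hm
    obtain ⟨s, t, rfl⟩ := List.append_of_mem hm
    exact h ⟨s, t, by simp⟩
  · rw [PySem.Chars.isIn_iff_infix] at h
    symm
    simp only [List.contains_eq_mem, decide_eq_true_eq]
    exact h.sublist.subset (by simp)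

-- char equality through ASCII codes
theorem pv_chr_eq_iff (c d : Char) : c = d ↔ c.toNat = d.toNat :=
  ⟨fun h => h ▸ rfl, fun h => Char.ext (UInt32.toNat_inj.mp h)⟩

-- the arithmetic code test holds exactly on punctuation ∪ digits
theorem pv_badCode_iff (c : Char) :
    pvBadCode c.toNat = true ↔ (c ∈ pvPunctuation ∨ c ∈ pvDigits) := by
  simp only [pvBadCode, pvPunctuation, pvDigits, List.mem_cons, List.not_mem_nil, or_false,
    Bool.and_eq_true, Bool.or_eq_true, Bool.not_eq_true', Bool.or_eq_false_iff,
    Bool.and_eq_false_iff, decide_eq_true_eq, decide_eq_false_iff_not,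
    pv_chr_eq_iff, Char.reduceToNat]
  omega

-- the early-exit scan finds a bad character iff one exists
theorem pv_scanBad_iff (l : List Char) :
    pvScanBad l = true ↔ ∃ c ∈ l, pvBadCode c.toNat = true := by
  induction l with
  | nil => simp [pvScanBad]
  | cons c rest ih =>
    simp only [pvScanBad, List.mem_cons]
    split_ifs with h
    · simp only [true_iff]; exact ⟨c, Or.inl rfl, h⟩
    · rw [ih]
      constructor
      · rintro ⟨d, hd, hb⟩; exact ⟨d, Or.inr hd, hb⟩
      · rintro ⟨d, rfl | hd, hb⟩
        · exact absurd hb h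
        · exact ⟨d, hd, hb⟩

-- ===== VERDICT (by name: the statement is the Claim_ definition above) =====
theorem is_bad_word_spec : Claim_equal_is_bad_word := by
  intro value _
  unfold Spec_is_bad_word is_bad_word is_bad_word_alt
  by_cases h3 : PySem.Str.len value < 3
  · rw [if_pos h3, if_pos h3]
  · rw [if_neg h3, if_neg h3, Bool.eq_iff_iff]
    simp only [pv_isIn_singleton]
    rw [pv_scanBad_iff]
    simp only [List.any_eq_true, List.contains_eq_mem, decide_eq_true_eq]
    constructor
    · intro h
      split_ifs at h with h1 h2
      · obtain ⟨v, hv, hm⟩ := h1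
        exact ⟨v, hm, (pv_badCode_iff v).2 (Or.inl hv)⟩
      · obtain ⟨v, hv, hm⟩ := h2
        exact ⟨v, hm, (pv_badCode_iff v).2 (Or.inr hv)⟩
    · rintro ⟨c, hc, hb⟩
      rcases (pv_badCode_iff c).1 hb with hp | hd
      · rw [if_pos (⟨c, hp, hc⟩ : ∃ x ∈ pvPunctuation, x ∈ value.toList)]
      · by_cases h1 : ∃ x ∈ pvPunctuation, x ∈ value.toList
        · rw [if_pos h1]
        · rw [if_neg h1, if_pos (⟨c, hd, hc⟩ : ∃ x ∈ pvDigits, x ∈ value.toList)]
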